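-- pv_equiv track=rewrite | github.com/JulioCesar-24/undp-publications-scraper | lincoln_pdf_scraper.py | is_publication_url
-- ===== SOURCE A (Python) =====
-- BASE_URL    = "https://www.lincolninst.edu"
--
-- EXCLUDE_PATHS = {
--     "/publications/",
--     "/publications/books/",
--     "/publications/policy-focus-reports-policy-briefs/",
--     "/publications/policy-focus-reports/",
--     "/publications/policy-briefs/",
--     "/publications/working-conference-papers/",
--     "/publications/working-papers/",
--     "/publications/conference-papers/",
--     "/publications/other/",
--     "/publications/land-lines-magazine/",
-- }
--
-- def is_publication_url(href):
--     """Devuelve True si el href apunta a una publicación individual."""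
--     if not href:
--         return False
--     # Debe contener /publications/ y no ser una sección genérica
--     path = href.replace(BASE_URL, "")
--     if "/publications/" not in path:
--         return False
--     # Excluir secciones genéricas
--     for excl in EXCLUDE_PATHS:
--         if path.rstrip("/") + "/" == excl or path == excl.rstrip("/"):
--             return False
--     # Debe tener al menos un segmento después del tipo
--     # ej: /publications/books/titulo-del-libro/  → OK
--     # ej: /publications/books/  → excluido
--     parts = [p for p in path.strip("/").split("/") if p]
--     return len(parts) >= 3  # ['publications', 'books', 'slug']
-- ===== SOURCE B (Python) =====
-- BASE_URL = "https://www.lincolninst.edu"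
--
-- def is_publication_url(href):
--     """Devuelve True si el href apunta a una publicación individual."""
--     if not href:
--         return False
--     path = href.replace(BASE_URL, "")
--     if "/publications/" not in path:
--         return False
--     # A URL points at an individual publication iff it has at least three
--     # path segments ('publications', type, slug).  Every generic section in
--     # A's EXCLUDE_PATHS table has at most two segments, so the table and its
--     # loop are unnecessary: the segment count alone decides.
--     parts = [p for p in path.strip("/").split("/") if p]
--     return len(parts) >= 3
-- ===== Notes on version B (the rewrite author's own statement) =====
-- stated objective: simpler
-- what changed: B drops A's EXCLUDE_PATHS table and its exclusion loop entirely: every excluded section has at most two path segments, so the final three-segment test already rejects them; B decides by the segment count alone.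
import Mathlib
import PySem

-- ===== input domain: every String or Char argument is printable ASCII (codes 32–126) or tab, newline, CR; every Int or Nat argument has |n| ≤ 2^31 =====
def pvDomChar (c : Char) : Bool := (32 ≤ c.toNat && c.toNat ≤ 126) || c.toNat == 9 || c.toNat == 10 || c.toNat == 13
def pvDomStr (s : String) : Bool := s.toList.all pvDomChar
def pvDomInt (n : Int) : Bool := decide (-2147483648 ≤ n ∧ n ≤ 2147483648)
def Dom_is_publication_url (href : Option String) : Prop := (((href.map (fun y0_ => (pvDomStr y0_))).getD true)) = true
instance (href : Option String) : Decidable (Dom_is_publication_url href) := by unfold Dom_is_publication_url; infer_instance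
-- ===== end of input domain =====

-- B drops A's EXCLUDE_PATHS table and exclusion loop: every excluded section has
-- at most two path segments, so the final three-segment test already
-- rejects them (objective: simpler).

-- ===== PORT A =====
-- shared module constants
def pvBASE : List Char := "https://www.lincolninst.edu".toList
def pvPUB : List Char := "/publications/".toList

def pvEXCLUDE : List (List Char) :=
  [ "/publications/".toList,
    "/publications/books/".toList,
    "/publications/policy-focus-reports-policy-briefs/".toList,
    "/publications/policy-focus-reports/".toList,
    "/publications/policy-briefs/".toList,
    "/publications/working-conference-papers/".toList,
    "/publications/working-papers/".toList,
    "/publications/conference-papers/".toList,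
    "/publications/other/".toList,
    "/publications/land-lines-magazine/".toList ]

-- hand port of Python s.rstrip("/") (PySem has only whole-string stripChars for a
-- char-set argument): drop the maximal run of '/' characters from the end; exact.
def pyRstripSl (s : List Char) : List Char :=
  (List.dropWhile (fun c => (['/'] : List Char).contains c) s.reverse).reverse

-- parts = [p for p in path.strip("/").split("/") if p]  (shared by both Pythons)
def pvParts (path : List Char) : List (List Char) :=
  (PySem.Chars.splitOn (PySem.Chars.stripChars path ['/']) ['/']).filter
    (fun piece => !piece.isEmpty)

def is_publication_url (href : Option String) : Bool :=
  match href with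
  | none => false                                   -- `if not href` (None is falsy)
  | some h =>
    if h.toList.isEmpty then false                  -- `if not href` (empty string)
    else
      let path := PySem.Chars.replace h.toList pvBASE []
      if !(PySem.Chars.isIn pvPUB path) then false
      else if pvEXCLUDE.any (fun excl =>
          (pyRstripSl path ++ ['/'] == excl) || (path == pyRstripSl excl)) then false
      else decide (3 ≤ (pvParts path).length)

-- ===== PORT B =====
def is_publication_url_alt (href : Option String) : Bool :=
  match href with
  | none => false
  | some h =>
    if h.toList.isEmpty then false
    else
      let path := PySem.Chars.replace h.toList pvBASE []
      if !(PySem.Chars.isIn pvPUB path) then false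
      else decide (3 ≤ (pvParts path).length)

-- ===== PRECONDITION & SPEC =====
def Spec_is_publication_url (href : Option String) (out : Bool) : Prop := out = is_publication_url_alt href
instance (href : Option String) (out : Bool) : Decidable (Spec_is_publication_url href out) := by unfold Spec_is_publication_url; infer_instance

-- ===== CLAIM (what is proved, stated in full; the proofs are below) =====
def Claim_equal_is_publication_url : Prop := ∀ (href : Option String), Dom_is_publication_url href → Spec_is_publication_url href (is_publication_url href)

-- ===== LEMMAS AND PROOFS =====

-- right-strip commutes with left-strip (both remove maximal runs at opposite ends)
theorem rdropWhile_dropWhile_comm {α : Type} (p : α → Bool) (l : List α) :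
    List.rdropWhile p (List.dropWhile p l) = List.dropWhile p (List.rdropWhile p l) := by
  by_cases hnil : List.dropWhile p l = []
  · rw [hnil]
    have hall : ∀ x ∈ l, p x := by
      rw [← List.dropWhile_eq_nil_iff]; exact hnil
    rw [List.rdropWhile_eq_nil_iff.mpr hall]
    simp [List.rdropWhile]
  · -- dropWhile p l is nonempty and its head fails p
    obtain ⟨hd, tl, ht⟩ := List.exists_cons_of_ne_nil hnil
    have hhd : ¬ p hd := by
      have := List.head_dropWhile_not (p := p) (l := l) (by simp [hnil])
      simpa [ht] using this
    have hrne : List.rdropWhile p (List.dropWhile p l) ≠ [] := by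
      rw [ht]
      intro hc
      exact hhd (List.rdropWhile_eq_nil_iff.mp hc hd (by simp))
    obtain ⟨u, hu⟩ := List.rdropWhile_prefix p (List.dropWhile p l)
    have hrcons : ∃ rest, List.rdropWhile p (List.dropWhile p l) = hd :: rest := by
      rcases hr : List.rdropWhile p (List.dropWhile p l) with _ | ⟨a, rest⟩
      · exact absurd hr hrne
      · refine ⟨rest, ?_⟩
        have := hu
        rw [hr, ht] at this
        simp at this
        rw [this.1]
    have hrd : List.rdropWhile p l = l.takeWhile p ++ List.rdropWhile p (List.dropWhile p l) := by
      conv_lhs => rw [(List.takeWhile_append_dropWhile (p := p) (l := l)).symm]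
      unfold List.rdropWhile
      rw [List.reverse_append, List.dropWhile_append]
      have hne : (List.dropWhile p (List.dropWhile p l).reverse).isEmpty = false := by
        rw [List.isEmpty_eq_false_iff]
        intro hc
        apply hrne
        unfold List.rdropWhile
        rw [hc]; rfl
      rw [hne]
      simp
    rw [hrd, List.dropWhile_append]
    have hte : (List.dropWhile p (l.takeWhile p)).isEmpty = true := by
      rw [List.isEmpty_iff, List.dropWhile_eq_nil_iff]
      exact fun x hx => List.mem_takeWhile_imp hx
    rw [hte]
    simp only [if_true]
    obtain ⟨rest, hr⟩ := hrcons
    rw [hr, List.dropWhile_cons_of_neg hhd]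

-- pyRstripSl is Mathlib's rdropWhile
theorem pyRstripSl_eq (s : List Char) :
    pyRstripSl s = List.rdropWhile (fun c => (['/'] : List Char).contains c) s := rfl

-- stripChars "/" is rstrip after lstrip
theorem stripChars_eq_rdrop_drop (s : List Char) :
    PySem.Chars.stripChars s ['/'] =
      List.rdropWhile (fun c => (['/'] : List Char).contains c)
        (List.dropWhile (fun c => (['/'] : List Char).contains c) s) := rfl

-- stripping is unaffected by a prior right-strip
theorem stripChars_rstrip (s : List Char) :
    PySem.Chars.stripChars (pyRstripSl s) ['/'] = PySem.Chars.stripChars s ['/'] := by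
  rw [stripChars_eq_rdrop_drop, stripChars_eq_rdrop_drop, pyRstripSl_eq,
      ← rdropWhile_dropWhile_comm, List.rdropWhile_idempotent]

-- the parts list ignores trailing slashes
theorem pvParts_rstrip (path : List Char) : pvParts path = pvParts (pyRstripSl path) := by
  unfold pvParts
  rw [stripChars_rstrip]

-- ===== VERDICT (by name: the statement is the Claim_ definition above) =====
theorem is_publication_url_spec : Claim_equal_is_publication_url := by
  intro href _
  unfold Spec_is_publication_url
  cases href with
  | none => rfl
  | some h =>
    simp only [is_publication_url, is_publication_url_alt]
    by_cases h1 : h.toList.isEmpty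
    · simp [h1]
    · simp only [h1, if_false, Bool.false_eq_true]
      set path := PySem.Chars.replace h.toList pvBASE [] with hpath
      by_cases h2 : PySem.Chars.isIn pvPUB path
      · simp only [h2, Bool.not_true, if_false, Bool.false_eq_true]
        cases hany : pvEXCLUDE.any (fun excl =>
            (pyRstripSl path ++ ['/'] == excl) || (path == pyRstripSl excl)) with
        | false => simp
        | true =>
          simp only [if_true]
          obtain ⟨e, he, hcond⟩ := List.any_eq_true.mp hany
          rw [Bool.or_eq_true, beq_iff_eq, beq_iff_eq] at hcond
          have hlt : (pvParts path).length < 3 := by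
            rcases hcond with hc | hc
            · have hcore : pyRstripSl path = e.dropLast := by
                rw [← hc]; simp
              rw [pvParts_rstrip path, hcore]
              fin_cases he <;> decide
            · rw [hc]
              fin_cases he <;> decide
          symm
          simp [Nat.not_le_of_lt hlt]
      · simp [h2]
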